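-- pv_equiv track=rewrite | github.com/RazK/Intro2CS | ex7/ex7.py | no_rep_seq_list_with_prefix
-- ===== SOURCE A (Python) =====
-- def no_rep_seq_list_with_prefix(char_list, n, prefix):
--     """
--     @brief      Reutrns a list of all possible n-characters-long string
--                 combinations of characters from the list starting with the given
--                 prefix, with no repeating characters.
--
--     @param      char_list  List     - list of characters (all different, none is
--                                       in the prefix)
--     @param      n          Integer  - length of the srings
--     @param      prefix     String   - the preix of the sequence
--     """
--     if (n < 0):
--         return []
--
--     if (n == 0):
--         return [prefix]
--
--     # Generate all possible sequences starting with the prefix followed by a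
--     # single character from the list
--     all_possible_sequences = []
--     for char in char_list:
--         rest_of_chars    = list_without_item(char_list, char)
--         prefix_with_char = prefix + char
--         sequences_with_char = no_rep_seq_list_with_prefix(rest_of_chars,
--                                                           n-1,
--                                                           prefix_with_char)
--         for sequence in sequences_with_char:
--             all_possible_sequences.append(sequence)
--
--     return all_possible_sequences
--
-- def list_without_item(lst, item):
--     """
--     @brief      returns a new list identical to the origianl without the
--                 specified item
--
--     @param      lst   The list to copy
--     @param      item  The item to remove
--
--     @return     A new list identical to the origianl without the
--                 specified item.
--     """
--     new_lst = list(lst)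
--     new_lst.remove(item)
--     return new_lst
-- ===== SOURCE B (Python) =====
-- def no_rep_seq_list_with_prefix(char_list, n, prefix):
--     if n < 0:
--         return []
--     frontier = [(list(char_list), prefix)]
--     for _ in range(n):
--         if not frontier:
--             break
--         new_frontier = []
--         for remaining, pre in frontier:
--             for ch in remaining:
--                 rest = list(remaining)
--                 rest.remove(ch)
--                 new_frontier.append((rest, pre + ch))
--         frontier = new_frontier
--     return [pre for _, pre in frontier]
-- ===== Notes on version B (the rewrite author's own statement) =====
-- stated objective: alternative
-- what changed: Replaces A's recursion (with per-call list copies and an append loop over each recursive result) by an iterative breadth-first frontier of (remaining, prefix) states expanded exactly n times.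
import Mathlib
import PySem

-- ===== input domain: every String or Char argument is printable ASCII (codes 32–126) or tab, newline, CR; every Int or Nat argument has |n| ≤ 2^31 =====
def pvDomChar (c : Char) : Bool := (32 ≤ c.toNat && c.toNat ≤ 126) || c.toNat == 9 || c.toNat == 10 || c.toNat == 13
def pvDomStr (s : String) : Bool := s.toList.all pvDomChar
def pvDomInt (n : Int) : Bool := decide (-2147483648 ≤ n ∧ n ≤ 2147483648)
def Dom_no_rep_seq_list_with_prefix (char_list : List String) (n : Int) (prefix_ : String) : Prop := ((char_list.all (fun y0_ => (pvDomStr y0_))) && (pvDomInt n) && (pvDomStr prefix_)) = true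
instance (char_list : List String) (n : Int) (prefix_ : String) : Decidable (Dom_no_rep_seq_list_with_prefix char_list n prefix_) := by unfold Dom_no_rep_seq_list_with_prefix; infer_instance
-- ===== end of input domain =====

-- B replaces A's recursion by an iterative breadth-first frontier of (remaining, prefix)
-- states expanded exactly n times (objective: alternative, same output and cost).

-- ===== PORT A =====
-- list.remove raises ValueError when item is absent; A only ever removes a member,
-- so the .getD fallback is never reached on A's calls.
def list_without_item (lst : List String) (item : String) : List String :=
  (PySem.List.remove? lst item).getD lst

def no_rep_seq_list_with_prefix (char_list : List String) (n : Int) (prefix_ : String) : List String :=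
  if _h1 : n < 0 then []
  else if _h2 : n = 0 then [prefix_]
  else
    -- for char in char_list: … for sequence in …: append(sequence)
    char_list.foldl
      (fun acc ch =>
        acc ++ no_rep_seq_list_with_prefix (list_without_item char_list ch) (n - 1) (prefix_ ++ ch))
      []
termination_by n.toNat
decreasing_by omega

-- ===== PORT B =====
-- one round of frontier expansion (the body of 'for _ in range(n)')
def pvAltStep (frontier : List (List String × String)) : List (List String × String) :=
  frontier.foldl
    (fun acc sp =>
      sp.1.foldl
        (fun acc2 ch => acc2 ++ [((PySem.List.remove? sp.1 ch).getD sp.1, sp.2 ++ ch)])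
        acc)
    []

def pvAltLoop : Nat → List (List String × String) → List (List String × String)
  | 0, f => f
  | k + 1, f => if f.isEmpty then f else pvAltLoop k (pvAltStep f)

def no_rep_seq_list_with_prefix_alt (char_list : List String) (n : Int) (prefix_ : String) : List String :=
  if n < 0 then []
  else (pvAltLoop n.toNat [(char_list, prefix_)]).map Prod.snd

-- ===== PRECONDITION & SPEC =====
def Spec_no_rep_seq_list_with_prefix (char_list : List String) (n : Int) (prefix_ : String) (out : List String) : Prop := out = no_rep_seq_list_with_prefix_alt char_list n prefix_
instance (char_list : List String) (n : Int) (prefix_ : String) (out : List String) : Decidable (Spec_no_rep_seq_list_with_prefix char_list n prefix_ out) := by unfold Spec_no_rep_seq_list_with_prefix; infer_instance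

-- ===== CLAIM (what is proved, stated in full; the proofs are below) =====
def Claim_equal_no_rep_seq_list_with_prefix : Prop := ∀ (char_list : List String) (n : Int) (prefix_ : String), Dom_no_rep_seq_list_with_prefix char_list n prefix_ → Spec_no_rep_seq_list_with_prefix char_list n prefix_ (no_rep_seq_list_with_prefix char_list n prefix_)

-- ===== LEMMAS AND PROOFS =====

theorem pvAltStep_eq_flatMap (f : List (List String × String)) :
    pvAltStep f =
      f.flatMap (fun sp => sp.1.map (fun ch => ((PySem.List.remove? sp.1 ch).getD sp.1, sp.2 ++ ch))) := by
  unfold pvAltStep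
  simp only [PySem.List.foldl_append_singleton_eq_map, PySem.List.foldl_append_eq_flatMap,
    List.nil_append]

theorem a_zero (cl : List String) (p : String) :
    no_rep_seq_list_with_prefix cl 0 p = [p] := by
  rw [no_rep_seq_list_with_prefix]; norm_num

theorem a_succ (k : Nat) (cl : List String) (p : String) :
    no_rep_seq_list_with_prefix cl ((k : Int) + 1) p =
      cl.flatMap (fun ch => no_rep_seq_list_with_prefix (list_without_item cl ch) (k : Int) (p ++ ch)) := by
  rw [no_rep_seq_list_with_prefix]
  have h1 : ¬ ((k : Int) + 1 < 0) := by omega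
  have h2 : ¬ ((k : Int) + 1 = 0) := by omega
  simp only [dif_neg h1, dif_neg h2]
  have : (k : Int) + 1 - 1 = (k : Int) := by omega
  rw [this, PySem.List.foldl_append_eq_flatMap, List.nil_append]

theorem loop_eq (k : Nat) : ∀ (f : List (List String × String)),
    (pvAltLoop k f).map Prod.snd =
      f.flatMap (fun sp => no_rep_seq_list_with_prefix sp.1 (k : Int) sp.2) := by
  induction k with
  | zero =>
      intro f
      show f.map Prod.snd = _
      induction f with
      | nil => rfl
      | cons hd tl ihf =>
          simp only [List.map_cons, List.flatMap_cons, ihf, Nat.cast_zero, a_zero,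
            List.singleton_append]
  | succ k ih =>
      intro f
      by_cases hf : f = []
      · simp [pvAltLoop, hf]
      · show (if f.isEmpty then f else pvAltLoop k (pvAltStep f)).map Prod.snd = _
        rw [if_neg (by simpa [List.isEmpty_iff] using hf)]
        rw [ih, pvAltStep_eq_flatMap, List.flatMap_assoc]
        congr 1
        funext sp
        rw [List.flatMap_map]
        have hc : ((k + 1 : Nat) : Int) = (k : Int) + 1 := by push_cast; ring
        rw [hc, a_succ]
        simp [list_without_item]

-- ===== VERDICT (by name: the statement is the Claim_ definition above) =====
theorem no_rep_seq_list_with_prefix_spec : Claim_equal_no_rep_seq_list_with_prefix := by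
  intro cl n p _
  unfold Spec_no_rep_seq_list_with_prefix no_rep_seq_list_with_prefix_alt
  by_cases h : n < 0
  · rw [no_rep_seq_list_with_prefix]
    simp [h]
  · rw [if_neg h, loop_eq]
    have hn : ((n.toNat : Nat) : Int) = n := by omega
    simp [hn]
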